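-- pv_equiv track=rewrite | github.com/chris-wood/Sboxes | src/analysis/galois_util.py | coset
-- ===== SOURCE A (Python) =====
-- def coset(s, n):
-- 	order = 2**n - 1
-- 	ns = 0
-- 	for i in range(1, order):
-- 		if (((s * (2 ** i)) % order) == s % order):
-- 			ns = i
-- 			break
-- 	cset = []
-- 	for i in range(ns):
-- 		cset.append((s * (2**i)) % order)
-- 	return cset, min(cset), len(cset)
-- ===== SOURCE B (Python) =====
-- def coset(s, n):
--     order = 2 ** n - 1
--     cset = []
--     if order > 1:
--         start = s % order
--         cur = start
--         while True:
--             cset.append(cur)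
--             cur = (cur * 2) % order
--             if cur == start:
--                 break
--     return cset, min(cset), len(cset)
-- ===== Notes on version B (the rewrite author's own statement) =====
-- stated objective: simpler
-- what changed: A searches range(1, 2^n-1) recomputing s*2**i mod order to find the coset length and then rebuilds the coset in a second pass; B generates the coset in one pass by repeated doubling mod order, stopping when the cycle returns to its start, so the length search disappears.
import Mathlib
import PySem

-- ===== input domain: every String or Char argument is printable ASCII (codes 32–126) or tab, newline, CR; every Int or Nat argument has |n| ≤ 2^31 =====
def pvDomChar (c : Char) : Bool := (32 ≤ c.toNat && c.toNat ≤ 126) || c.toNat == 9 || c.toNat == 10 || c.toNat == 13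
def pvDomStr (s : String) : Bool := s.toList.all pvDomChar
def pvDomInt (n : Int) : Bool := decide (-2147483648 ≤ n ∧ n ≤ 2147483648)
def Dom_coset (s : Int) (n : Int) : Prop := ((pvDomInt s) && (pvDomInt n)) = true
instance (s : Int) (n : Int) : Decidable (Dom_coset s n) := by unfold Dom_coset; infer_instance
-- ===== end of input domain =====

-- B replaces A's two passes (length search, then rebuild) by one cycle-walk of repeated
-- doubling mod order; proved equal on n ≥ 2 (for n ≤ 1 the Python A raises: min of empty list).

-- ===== PORT A =====
-- 'for i in range(1, order): if (s*2**i) % order == s % order: ns = i; break' — fuel = number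
-- of remaining range elements, i the current index; returns ns (0 if the loop never breaks).
def cosetFind (s order : Int) (i : Int) (fuel : Nat) : Int :=
  match fuel with
  | 0 => 0
  | f + 1 =>
    if PySem.Int.mod (s * 2 ^ i.toNat) order = PySem.Int.mod s order then i
    else cosetFind s order (i + 1) f

def coset (s : Int) (n : Int) : List Int × Int × Int :=
  let order : Int := 2 ^ n.toNat - 1
  let ns := cosetFind s order 1 (order - 1).toNat
  let cset := (PySem.List.pyRange 0 ns 1).map (fun i => PySem.Int.mod (s * 2 ^ i.toNat) order)
  -- Python 'min(cset)' raises on []; that happens only for n ≤ 1, excluded by Pre_coset.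
  (cset, (PySem.List.min? cset (fun x => x)).getD 0, cset.length)

-- ===== PORT B =====
-- 'while True: cset.append(cur); cur = (cur*2) % order; if cur == start: break' — the cycle
-- has length < order, so fuel = order.toNat suffices; fuel 0 is unreachable under Pre_coset.
def cosetCycle (order start cur : Int) (fuel : Nat) : List Int :=
  match fuel with
  | 0 => []
  | f + 1 =>
    let next := PySem.Int.mod (cur * 2) order
    if next = start then [cur] else cur :: cosetCycle order start next f

def coset_alt (s : Int) (n : Int) : List Int × Int × Int :=
  let order : Int := 2 ^ n.toNat - 1
  let cset :=
    if 1 < order then cosetCycle order (PySem.Int.mod s order) (PySem.Int.mod s order) order.toNat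
    else []
  (cset, (PySem.List.min? cset (fun x => x)).getD 0, cset.length)

-- ===== PRECONDITION & SPEC =====
-- Pre_coset excludes exactly the inputs where the Python A raises: n ≤ 1 gives an empty coset
-- and min([]) raises ValueError (negative n already raises TypeError at range()).
def Pre_coset (s : Int) (n : Int) : Prop := 2 ≤ n
instance (s : Int) (n : Int) : Decidable (Pre_coset s n) := by unfold Pre_coset; infer_instance
def pvWitness_coset : Int × Int := (3, 4)

def Spec_coset (s : Int) (n : Int) (out : List Int × Int × Int) : Prop := out = coset_alt s n
instance (s : Int) (n : Int) (out : List Int × Int × Int) : Decidable (Spec_coset s n out) := by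
  unfold Spec_coset; infer_instance

-- ===== CLAIM (what is proved, stated in full; the proofs are below) =====
def Claim_equal_coset : Prop :=
  ∀ (s : Int) (n : Int), Dom_coset s n → Pre_coset s n → Spec_coset s n (coset s n)

-- ===== LEMMAS AND PROOFS =====

-- gg s m k = (s * 2^k) % m, the k-th element of the coset; both loops walk this sequence.
def gg (s m : Int) (k : Nat) : Int := (s * 2 ^ k) % m

theorem gg_zero (s m : Int) : gg s m 0 = s % m := by simp [gg]

theorem gg_step (s m : Int) (hm : (2:Int) < m) (k : Nat) :
    PySem.Int.mod (gg s m k * 2) m = gg s m (k+1) := by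
  rw [PySem.Int.mod_eq_emod_of_pos (by omega)]
  unfold gg
  rw [pow_succ, ← mul_assoc]
  conv_rhs => rw [Int.mul_emod]
  rw [Int.emod_eq_of_lt (by norm_num) hm]

theorem gg_period (s : Int) (N : Nat) :
    gg s ((2:Int)^N - 1) N = gg s ((2:Int)^N - 1) 0 := by
  unfold gg
  have h : s * (2:Int)^N = s * 1 + ((2:Int)^N - 1) * s := by ring
  rw [h, Int.add_mul_emod_self_left]
  norm_num

theorem two_pow_ge (N : Nat) (h : 2 ≤ N) : N + 2 ≤ 2 ^ N := by
  induction N with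
  | zero => omega
  | succ k ih =>
    rcases Nat.lt_or_ge k 2 with hk | hk
    · interval_cases k
      · omega
      · norm_num
    · have h1 := ih hk
      have h2 : 2 ^ k ≤ 2 ^ (k+1) := Nat.pow_le_pow_right (by norm_num) (by omega)
      omega

-- A's search loop returns the least i ≥ 1 with gg s m i = gg s m 0, given enough fuel.
theorem cosetFind_eq (s m : Int) (hm : (2:Int) < m) (ns : Nat)
    (hns : gg s m ns = gg s m 0) (hmin : ∀ j, 1 ≤ j → j < ns → gg s m j ≠ gg s m 0) :
    ∀ (fuel i : Nat), 1 ≤ i → i ≤ ns → ns < i + fuel →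
      cosetFind s m (i:Int) fuel = (ns:Int) := by
  intro fuel
  induction fuel with
  | zero => intro i h1 h2 h3; omega
  | succ f ih =>
    intro i h1 h2 h3
    rw [cosetFind]
    have hcond : (PySem.Int.mod (s * 2 ^ ((i:Int)).toNat) m = PySem.Int.mod s m) ↔
        (gg s m i = gg s m 0) := by
      rw [PySem.Int.mod_eq_emod_of_pos (by omega), PySem.Int.mod_eq_emod_of_pos (by omega),
        Int.toNat_natCast]
      unfold gg; norm_num
    by_cases h : gg s m i = gg s m 0
    · have hi : i = ns := by
        by_contra hne
        exact hmin i h1 (by omega) h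
      rw [if_pos (hcond.mpr h), hi]
    · rw [if_neg (fun hc => h (hcond.mp hc))]
      have : ((i:Int) + 1) = (((i+1 : Nat)):Int) := by push_cast; ring
      rw [this]
      have hilt : i < ns := by
        by_contra h'
        exact h (by have he : i = ns := (by omega); rw [he]; exact hns)
      exact ih (i+1) (by omega) (by omega) (by omega)

-- B's cycle walk from gg s m k lists gg s m k, …, gg s m (ns-1), given enough fuel.
theorem cosetCycle_eq (s m : Int) (hm : (2:Int) < m) (ns : Nat)
    (hns : gg s m ns = gg s m 0) (hmin : ∀ j, 1 ≤ j → j < ns → gg s m j ≠ gg s m 0) :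
    ∀ (fuel k : Nat), k < ns → ns - k ≤ fuel →
      cosetCycle m (gg s m 0) (gg s m k) fuel
        = (List.range (ns - k)).map (fun t => gg s m (k + t)) := by
  intro fuel
  induction fuel with
  | zero => intro k h1 h2; omega
  | succ f ih =>
    intro k h1 h2
    rw [cosetCycle]
    simp only [gg_step s m hm]
    by_cases h : gg s m (k+1) = gg s m 0
    · have hk : k + 1 = ns := by
        by_contra hne
        exact hmin (k+1) (by omega) (by omega) h
      rw [if_pos h]
      have : ns - k = 1 := by omega
      rw [this]
      simp
    · rw [if_neg h]
      have hk : k + 1 < ns := by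
        by_contra h'
        exact h (by have he : k + 1 = ns := (by omega); rw [he]; exact hns)
      rw [ih (k+1) (by omega) (by omega)]
      have : ns - k = (ns - (k+1)) + 1 := by omega
      rw [this, List.range_succ_eq_map, List.map_cons, List.map_map]
      simp only [Nat.add_zero]
      congr 1
      apply List.map_congr_left
      intro t _
      show gg s m (k + 1 + t) = gg s m (k + (t + 1))
      congr 1
      omega

-- ===== VERDICT (by name: the statement is the Claim_ definition above) =====
theorem coset_spec : Claim_equal_coset := by
  intro s n _ hn
  unfold Pre_coset at hn
  unfold Spec_coset coset coset_alt
  set N := n.toNat with hNdef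
  have hN2 : 2 ≤ N := by simp only [hNdef]; omega
  have hMcast : ((2:Int)^N) = ((2^N : Nat) : Int) := by push_cast; ring
  have hM4 : 4 ≤ 2 ^ N := by
    calc 4 = 2^2 := by norm_num
    _ ≤ 2^N := Nat.pow_le_pow_right (by norm_num) hN2
  set m : Int := 2^N - 1 with hm
  have hm2 : (2:Int) < m := by rw [hm, hMcast]; omega
  have hex : ∃ j, gg s m (j+1) = gg s m 0 := by
    refine ⟨N - 1, ?_⟩
    have hcoe : N - 1 + 1 = N := by omega
    rw [hcoe, hm]
    exact gg_period s N
  set ns := Nat.find hex + 1 with hns_def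
  have hns : gg s m ns = gg s m 0 := Nat.find_spec hex
  have hmin : ∀ j, 1 ≤ j → j < ns → gg s m j ≠ gg s m 0 := by
    intro j h1 h2
    have hmn := Nat.find_min hex (m := j - 1) (by omega)
    have hj : j - 1 + 1 = j := by omega
    rwa [hj] at hmn
  have hnsN : ns ≤ N := by
    have := Nat.find_min' hex (m := N - 1)
      (by have hcoe : N - 1 + 1 = N := by omega
          rw [hcoe, hm]; exact gg_period s N)
    omega
  have hbound : ns ≤ 2 ^ N - 2 := by
    have := two_pow_ge N hN2
    omega
  -- A's search result is ns
  have hfuel : (m - 1).toNat = 2 ^ N - 2 := by omega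
  have hfind : cosetFind s m 1 ((m - 1).toNat) = (ns : Int) := by
    rw [hfuel]
    have h1 : ((1:Nat):Int) = (1:Int) := by norm_num
    rw [← h1]
    exact cosetFind_eq s m hm2 ns hns hmin (2 ^ N - 2) 1 (le_refl 1) (by omega) (by omega)
  -- A's list
  have hA : (PySem.List.pyRange 0 (ns:Int) 1).map
      (fun i => PySem.Int.mod (s * 2 ^ i.toNat) m) = (List.range ns).map (gg s m) := by
    rw [PySem.List.pyRange_one, List.map_map]
    have hlen : (((ns:Int)) - 0).toNat = ns := by omega
    rw [hlen]
    apply List.map_congr_left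
    intro k _
    show PySem.Int.mod (s * 2 ^ ((0:Int) + (k:Int)).toNat) m = gg s m k
    rw [PySem.Int.mod_eq_emod_of_pos (by omega)]
    have : ((0:Int) + (k:Int)).toNat = k := by omega
    rw [this]
    rfl
  -- B's list
  have hB : cosetCycle m (PySem.Int.mod s m) (PySem.Int.mod s m) m.toNat
      = (List.range ns).map (gg s m) := by
    have hs : PySem.Int.mod s m = gg s m 0 := by
      rw [PySem.Int.mod_eq_emod_of_pos (by omega), gg_zero]
    rw [hs]
    have := cosetCycle_eq s m hm2 ns hns hmin m.toNat 0 (by omega) (by omega)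
    simpa using this
  have hm1 : (1:Int) < m := by omega
  simp only [hfind, hA, if_pos hm1, hB]
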